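-- pv_equiv track=rewrite | github.com/GEM-benchmark/NL-Augmenter | filters/universal_bias_filter/filter.py | count_groups
-- ===== SOURCE A (Python) =====
-- def count_groups(flagged_corpus):
--     target_count = len(
--         [
--             flag
--             for flag in flagged_corpus
--             if flag.get("target_flag") is True
--         ]
--     )
--     test_count = len(
--         [flag for flag in flagged_corpus if flag.get("test_flag") is True]
--     )
--     neutral_count = len(
--         [
--             flag
--             for flag in flagged_corpus
--             if flag.get("neutral_flag") is True
--         ]
--     )
--
--     return target_count, test_count, neutral_count
-- ===== SOURCE B (Python) =====
-- def count_groups(flagged_corpus):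
--     # Build one histogram of flag names whose value is True, then read the
--     # three requested counts off the histogram.
--     counts = {}
--     for flag in flagged_corpus:
--         for key, value in flag.items():
--             if value is True:
--                 counts[key] = counts.get(key, 0) + 1
--     return (
--         counts.get("target_flag", 0),
--         counts.get("test_flag", 0),
--         counts.get("neutral_flag", 0),
--     )
-- ===== Notes on version B (the rewrite author's own statement) =====
-- stated objective: alternative
-- what changed: Instead of A's three filter-then-len passes, B builds a single histogram dict mapping every flag name with a True value to its frequency across the corpus, then answers the three counts by dictionary lookups; Pre_ excludes association lists with duplicate keys inside one flag dict, which no Python dict can represent.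
import Mathlib
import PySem

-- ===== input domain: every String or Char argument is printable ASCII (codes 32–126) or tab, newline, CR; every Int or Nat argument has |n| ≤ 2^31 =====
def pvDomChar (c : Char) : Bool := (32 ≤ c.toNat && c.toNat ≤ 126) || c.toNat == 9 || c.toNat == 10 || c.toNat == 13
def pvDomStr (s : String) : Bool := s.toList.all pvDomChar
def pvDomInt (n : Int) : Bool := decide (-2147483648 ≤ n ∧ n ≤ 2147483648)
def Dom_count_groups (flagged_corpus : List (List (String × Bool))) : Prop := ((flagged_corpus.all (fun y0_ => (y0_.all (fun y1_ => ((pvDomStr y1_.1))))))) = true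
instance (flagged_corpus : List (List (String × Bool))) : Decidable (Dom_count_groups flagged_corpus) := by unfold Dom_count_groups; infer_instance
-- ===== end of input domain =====

-- B builds one histogram dict of flag names with a True value and reads the three counts
-- off it, instead of A's three filter-then-len passes (objective: alternative).

-- ===== PORT A =====
-- flag.get(k): dict lookup (first match over the association list)
def pvFlagGet (flag : List (String × Bool)) (k : String) : Option Bool :=
  (flag.find? (fun p => p.1 == k)).map (·.2)

def count_groups (flagged_corpus : List (List (String × Bool))) : Int × Int × Int :=
  let target_count := PySem.List.len (flagged_corpus.filter (fun flag => pvFlagGet flag "target_flag" == some true))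
  let test_count := PySem.List.len (flagged_corpus.filter (fun flag => pvFlagGet flag "test_flag" == some true))
  let neutral_count := PySem.List.len (flagged_corpus.filter (fun flag => pvFlagGet flag "neutral_flag" == some true))
  (target_count, test_count, neutral_count)

-- ===== PORT B =====
def count_groups_alt (flagged_corpus : List (List (String × Bool))) : Int × Int × Int :=
  let counts : PySem.Dict String Int :=
    flagged_corpus.foldl
      (fun counts flag =>
        flag.foldl
          (fun counts kv =>
            if kv.2 then counts.insert kv.1 (counts.getD kv.1 0 + 1) else counts)
          counts)
      PySem.Dict.empty
  (counts.getD "target_flag" 0, counts.getD "test_flag" 0, counts.getD "neutral_flag" 0)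

-- ===== PRECONDITION & SPEC =====
-- Pre_ excludes association lists in which one flag dict carries a duplicate key: a Python
-- dict cannot have duplicate keys, so such lists represent no Python input, and on them the
-- first-match lookup (A's port) and the item iteration (B's port) legitimately disagree.
def Pre_count_groups (flagged_corpus : List (List (String × Bool))) : Prop :=
  ∀ flag ∈ flagged_corpus, (flag.map Prod.fst).Nodup
instance (flagged_corpus : List (List (String × Bool))) : Decidable (Pre_count_groups flagged_corpus) := by unfold Pre_count_groups; infer_instance

def pvWitness_count_groups : (List (List (String × Bool))) :=
  [[("target_flag", true), ("test_flag", false)], [("neutral_flag", true)]]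

def Spec_count_groups (flagged_corpus : List (List (String × Bool))) (out : Int × Int × Int) : Prop := out = count_groups_alt flagged_corpus
instance (flagged_corpus : List (List (String × Bool))) (out : Int × Int × Int) : Decidable (Spec_count_groups flagged_corpus out) := by unfold Spec_count_groups; infer_instance

-- ===== CLAIM (what is proved, stated in full; the proofs are below) =====
def Claim_equal_count_groups : Prop := ∀ (flagged_corpus : List (List (String × Bool))), Dom_count_groups flagged_corpus → Pre_count_groups flagged_corpus → Spec_count_groups flagged_corpus (count_groups flagged_corpus)

-- ===== LEMMAS AND PROOFS =====
-- inner loop: processing one flag adds, at key k, the number of (k, true) entries of that flag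
theorem inner_getD (flag : List (String × Bool)) (d : PySem.Dict String Int) (k : String) :
    (flag.foldl (fun counts kv =>
        if kv.2 then counts.insert kv.1 (counts.getD kv.1 0 + 1) else counts) d).getD k 0
      = d.getD k 0 + (flag.countP (fun p => p.1 == k && p.2) : Int) := by
  induction flag generalizing d with
  | nil => simp
  | cons a t ih =>
    simp only [List.foldl_cons, List.countP_cons, ih]
    rcases a with ⟨ak, av⟩
    by_cases hv : av
    · by_cases hk : ak = k
      · subst hk; simp [hv]; ring
      · simp [hv, PySem.Dict.getD_insert, hk, Ne.symm hk]
    · simp [hv]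

-- with nodup keys, that per-flag count is the indicator of flag.get(k) is True
theorem countP_eq_indicator (flag : List (String × Bool)) (k : String)
    (h : (flag.map Prod.fst).Nodup) :
    (flag.countP (fun p => p.1 == k && p.2) : Int)
      = (if pvFlagGet flag k == some true then 1 else 0) := by
  induction flag with
  | nil => simp [pvFlagGet]
  | cons a t ih =>
    simp only [List.map_cons, List.nodup_cons] at h
    rcases a with ⟨ak, av⟩
    by_cases hk : ak = k
    · subst hk
      have ht : t.countP (fun p => p.1 == ak && p.2) = 0 := by
        rw [List.countP_eq_zero]
        intro p hp
        have : p.1 ∈ t.map Prod.fst := List.mem_map_of_mem hp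
        simp only [Bool.and_eq_true, beq_iff_eq]
        intro hc
        exact absurd (hc.1 ▸ this) h.1
      by_cases hv : av <;>
        simp [pvFlagGet, hv, ht]
    · have ht2 := ih h.2
      unfold pvFlagGet at ht2 ⊢
      rw [List.find?_cons_of_neg (by simp [hk]), List.countP_cons]
      simpa [hk] using ht2

-- outer loop: the histogram at key k counts flags with a (k, true) entry
theorem outer_getD (fc : List (List (String × Bool))) (d : PySem.Dict String Int) (k : String)
    (hpre : ∀ flag ∈ fc, (flag.map Prod.fst).Nodup) :
    (fc.foldl (fun counts flag =>
        flag.foldl (fun counts kv =>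
          if kv.2 then counts.insert kv.1 (counts.getD kv.1 0 + 1) else counts) counts) d).getD k 0
      = d.getD k 0 + PySem.List.len (fc.filter (fun flag => pvFlagGet flag k == some true)) := by
  induction fc generalizing d with
  | nil => simp [PySem.List.len]
  | cons f t ih =>
    have hf := hpre f (by simp)
    have ht : ∀ flag ∈ t, (flag.map Prod.fst).Nodup := fun flag hm => hpre flag (by simp [hm])
    simp only [List.foldl_cons, List.filter_cons]
    rw [ih _ ht, inner_getD, countP_eq_indicator f k hf]
    by_cases hcase : pvFlagGet f k == some true
    · simp [hcase, PySem.List.len]; ring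
    · simp [hcase, PySem.List.len]

theorem count_groups_eq (fc : List (List (String × Bool)))
    (hpre : ∀ flag ∈ fc, (flag.map Prod.fst).Nodup) :
    count_groups fc = count_groups_alt fc := by
  unfold count_groups count_groups_alt
  simp only
  rw [outer_getD fc _ _ hpre, outer_getD fc _ _ hpre, outer_getD fc _ _ hpre]
  simp

-- ===== VERDICT (by name: the statement is the Claim_ definition above) =====
theorem count_groups_spec : Claim_equal_count_groups := by
  intro fc _ hpre
  show count_groups fc = count_groups_alt fc
  exact count_groups_eq fc hpre
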